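-- pv_equiv track=rewrite | github.com/BrianDYKim/practice_coding_test_python | programmers/lv2/programmers_77485.py | serialize_matrix
-- ===== SOURCE A (Python) =====
-- def serialize_matrix(graph, x1, y1, x2, y2):
--     result = []
--
--     # 맨 위의 가로를 직렬화한다 (끝은 미포함)
--     for i in range(y1, y2):
--         result.append([x1, i, graph[x1][i]])
--
--     # 맨 오른쪽 세로 라인을 직렬화한다 (끝은 미포함)
--     for i in range(x1, x2):
--         result.append([i, y2, graph[i][y2]])
--
--     # 맨 아래 라인을 직렬화한다 (끝은 미포함)
--     for i in range(y2, y1, -1):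
--         result.append([x2, i, graph[x2][i]])
--
--     # 맨 왼쪽 라인을 직렬화한다 (끝은 미포함)
--     for i in range(x2, x1, -1):
--         result.append([i, y1, graph[i][y1]])
--
--     return result
-- ===== SOURCE B (Python) =====
-- def serialize_matrix(graph, x1, y1, x2, y2):
--     # One flat loop over the perimeter index; the coordinate of each step is
--     # computed in closed form from k instead of four separate side loops.
--     h = max(y2 - y1, 0)
--     v = max(x2 - x1, 0)
--     out = []
--     for k in range(2 * h + 2 * v):
--         if k < h:
--             r, c = x1, y1 + k
--         elif k < h + v:
--             r, c = x1 + (k - h), y2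
--         elif k < 2 * h + v:
--             r, c = x2, y2 - (k - h - v)
--         else:
--             r, c = x2 - (k - 2 * h - v), y1
--         out.append([r, c, graph[r][c]])
--     return out
-- ===== Notes on version B (the rewrite author's own statement) =====
-- stated objective: alternative
-- what changed: Replaces A's four separate border loops (top, right, bottom, left) by one flat loop over the perimeter index whose (row, column) coordinate is computed in closed form from the index.
import Mathlib
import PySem

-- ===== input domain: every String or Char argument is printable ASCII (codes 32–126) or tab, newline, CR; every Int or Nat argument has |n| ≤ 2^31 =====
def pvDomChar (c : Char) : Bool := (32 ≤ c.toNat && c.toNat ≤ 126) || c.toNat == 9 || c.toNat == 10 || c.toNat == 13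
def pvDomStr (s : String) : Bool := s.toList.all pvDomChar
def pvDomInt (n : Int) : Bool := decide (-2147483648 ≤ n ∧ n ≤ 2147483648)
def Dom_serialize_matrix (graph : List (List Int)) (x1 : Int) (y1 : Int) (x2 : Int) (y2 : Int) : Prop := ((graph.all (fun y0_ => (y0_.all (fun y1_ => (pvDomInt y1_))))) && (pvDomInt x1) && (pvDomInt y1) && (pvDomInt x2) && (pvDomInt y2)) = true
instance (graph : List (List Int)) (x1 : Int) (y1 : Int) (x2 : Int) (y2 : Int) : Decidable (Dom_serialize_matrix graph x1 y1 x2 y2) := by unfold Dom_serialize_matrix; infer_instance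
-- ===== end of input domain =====

-- B replaces A's four side loops by one flat loop whose coordinate is computed in closed form from the perimeter index; same cost, different decomposition (objective: alternative).

-- ===== PORT A =====
-- graph[x][i] is ported as pyGetD ∘ pyGetD; Pre_ guarantees every access is a valid Python index.
def serialize_matrix (graph : List (List Int)) (x1 : Int) (y1 : Int) (x2 : Int) (y2 : Int) : List (List Int) :=
  let result : List (List Int) := []
  let result := (PySem.List.pyRange y1 y2 1).foldl
    (fun res i => res ++ [[x1, i, PySem.List.pyGetD (PySem.List.pyGetD graph x1 []) i 0]]) result
  let result := (PySem.List.pyRange x1 x2 1).foldl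
    (fun res i => res ++ [[i, y2, PySem.List.pyGetD (PySem.List.pyGetD graph i []) y2 0]]) result
  let result := (PySem.List.pyRange y2 y1 (-1)).foldl
    (fun res i => res ++ [[x2, i, PySem.List.pyGetD (PySem.List.pyGetD graph x2 []) i 0]]) result
  let result := (PySem.List.pyRange x2 x1 (-1)).foldl
    (fun res i => res ++ [[i, y1, PySem.List.pyGetD (PySem.List.pyGetD graph i []) y1 0]]) result
  result

-- ===== PORT B =====
def serialize_matrix_alt (graph : List (List Int)) (x1 : Int) (y1 : Int) (x2 : Int) (y2 : Int) : List (List Int) :=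
  let h := max (y2 - y1) 0
  let v := max (x2 - x1) 0
  (PySem.List.pyRange 0 (2 * h + 2 * v) 1).foldl
    (fun out k =>
      let rc : Int × Int :=
        if k < h then (x1, y1 + k)
        else if k < h + v then (x1 + (k - h), y2)
        else if k < 2 * h + v then (x2, y2 - (k - h - v))
        else (x2 - (k - 2 * h - v), y1)
      out ++ [[rc.1, rc.2, PySem.List.pyGetD (PySem.List.pyGetD graph rc.1 []) rc.2 0]]) []

-- ===== PRECONDITION & SPEC =====
-- Pre_ excludes exactly the inputs on which A raises IndexError: some visited border cell has a
-- row or column index outside Python's valid range. Row/column interval validity is stated by its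
-- endpoints; the quantified ranges are clamped to the matrix size (a no-op whenever the endpoint
-- checks hold) so the condition is checkable without enumerating huge index ranges.
def Pre_serialize_matrix (graph : List (List Int)) (x1 : Int) (y1 : Int) (x2 : Int) (y2 : Int) : Prop :=
  (y1 < y2 → PySem.Raise.InRange graph.length x1 ∧
    PySem.Raise.InRange (PySem.List.pyGetD graph x1 []).length y1 ∧
    PySem.Raise.InRange (PySem.List.pyGetD graph x1 []).length (y2 - 1)) ∧
  (x1 < x2 → PySem.Raise.InRange graph.length x1 ∧ PySem.Raise.InRange graph.length (x2 - 1) ∧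
    ∀ i ∈ PySem.List.pyRange (max x1 (-(graph.length : Int))) (min x2 (graph.length : Int)) 1,
      PySem.Raise.InRange (PySem.List.pyGetD graph i []).length y2) ∧
  (y1 < y2 → PySem.Raise.InRange graph.length x2 ∧
    PySem.Raise.InRange (PySem.List.pyGetD graph x2 []).length (y1 + 1) ∧
    PySem.Raise.InRange (PySem.List.pyGetD graph x2 []).length y2) ∧
  (x1 < x2 → PySem.Raise.InRange graph.length (x1 + 1) ∧ PySem.Raise.InRange graph.length x2 ∧
    ∀ i ∈ PySem.List.pyRange (max (x1 + 1) (-(graph.length : Int))) (min (x2 + 1) (graph.length : Int)) 1,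
      PySem.Raise.InRange (PySem.List.pyGetD graph i []).length y1)
instance (graph : List (List Int)) (x1 : Int) (y1 : Int) (x2 : Int) (y2 : Int) : Decidable (Pre_serialize_matrix graph x1 y1 x2 y2) := by unfold Pre_serialize_matrix; infer_instance

def pvWitness_serialize_matrix : List (List Int) × Int × Int × Int × Int := ([[1, 2], [3, 4]], 0, 0, 1, 1)

def Spec_serialize_matrix (graph : List (List Int)) (x1 : Int) (y1 : Int) (x2 : Int) (y2 : Int) (out : List (List Int)) : Prop := out = serialize_matrix_alt graph x1 y1 x2 y2
instance (graph : List (List Int)) (x1 : Int) (y1 : Int) (x2 : Int) (y2 : Int) (out : List (List Int)) : Decidable (Spec_serialize_matrix graph x1 y1 x2 y2 out) := by unfold Spec_serialize_matrix; infer_instance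

-- ===== CLAIM =====
def Claim_equal_serialize_matrix : Prop := ∀ (graph : List (List Int)) (x1 : Int) (y1 : Int) (x2 : Int) (y2 : Int), Dom_serialize_matrix graph x1 y1 x2 y2 → Pre_serialize_matrix graph x1 y1 x2 y2 → Spec_serialize_matrix graph x1 y1 x2 y2 (serialize_matrix graph x1 y1 x2 y2)

-- ===== LEMMAS AND PROOFS =====

-- the cell value both ports read
def pvG (graph : List (List Int)) (r c : Int) : Int :=
  PySem.List.pyGetD (PySem.List.pyGetD graph r []) c 0

-- B's closed-form coordinate-and-cell for flat perimeter index k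
def pvCell (graph : List (List Int)) (x1 y1 x2 y2 k : Int) : List Int :=
  let h := max (y2 - y1) 0
  let v := max (x2 - x1) 0
  let rc : Int × Int :=
    if k < h then (x1, y1 + k)
    else if k < h + v then (x1 + (k - h), y2)
    else if k < 2 * h + v then (x2, y2 - (k - h - v))
    else (x2 - (k - 2 * h - v), y1)
  [rc.1, rc.2, pvG graph rc.1 rc.2]

lemma pvFoldl_append_map {α : Type} (f : α → List Int) (l : List α) (init : List (List Int)) :
    l.foldl (fun res i => res ++ [f i]) init = init ++ l.map f := by
  induction l generalizing init with
  | nil => simp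
  | cons a t ih => simp [ih, List.append_assoc]

lemma pvA_eq_maps (graph : List (List Int)) (x1 y1 x2 y2 : Int) :
    serialize_matrix graph x1 y1 x2 y2 =
      (List.range (y2 - y1).toNat).map (fun (k : Nat) => [x1, y1 + (k : Int), pvG graph x1 (y1 + (k : Int))])
      ++ ((List.range (x2 - x1).toNat).map (fun (k : Nat) => [x1 + (k : Int), y2, pvG graph (x1 + (k : Int)) y2])
      ++ ((List.range (y2 - y1).toNat).map (fun (k : Nat) => [x2, y2 - (k : Int), pvG graph x2 (y2 - (k : Int))])
      ++ (List.range (x2 - x1).toNat).map (fun (k : Nat) => [x2 - (k : Int), y1, pvG graph (x2 - (k : Int)) y1]))) := by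
  simp only [serialize_matrix, pvFoldl_append_map, List.nil_append, List.append_assoc,
    PySem.List.pyRange_one, PySem.List.pyRange_neg_one, List.map_map]
  rfl

lemma pvB_eq_map (graph : List (List Int)) (x1 y1 x2 y2 : Int) :
    serialize_matrix_alt graph x1 y1 x2 y2 =
      (List.range ((y2 - y1).toNat + ((x2 - x1).toNat + ((y2 - y1).toNat + (x2 - x1).toNat)))).map
        (fun (k : Nat) => pvCell graph x1 y1 x2 y2 (k : Int)) := by
  have hN : (2 * max (y2 - y1) 0 + 2 * max (x2 - x1) 0 - 0).toNat
      = (y2 - y1).toNat + ((x2 - x1).toNat + ((y2 - y1).toNat + (x2 - x1).toNat)) := by omega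
  simp only [serialize_matrix_alt, pvFoldl_append_map, List.nil_append,
    PySem.List.pyRange_one, hN, List.map_map]
  apply List.map_congr_left
  intro k _
  simp [Function.comp, pvCell, pvG]

-- ===== VERDICT =====
theorem serialize_matrix_spec : Claim_equal_serialize_matrix := by
  intro graph x1 y1 x2 y2 _ _
  unfold Spec_serialize_matrix
  rw [pvA_eq_maps, pvB_eq_map]
  rw [List.range_add, List.range_add, List.range_add]
  simp only [List.map_append, List.map_map]
  have hh : max (y2 - y1) 0 = (((y2 - y1).toNat : Nat) : Int) := by omega
  have hv : max (x2 - x1) 0 = (((x2 - x1).toNat : Nat) : Int) := by omega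
  congr 1
  · apply List.map_congr_left
    intro k hk
    rw [List.mem_range] at hk
    simp only [pvCell, hh, hv]
    rw [if_pos (by omega)]
  congr 1
  · apply List.map_congr_left
    intro k hk
    rw [List.mem_range] at hk
    simp only [Function.comp, pvCell, hh, hv]
    rw [if_neg (by push_cast; omega), if_pos (by push_cast; omega)]
    have h2 : x1 + ((((y2 - y1).toNat + k : Nat) : Int) - ((y2 - y1).toNat : Int)) = x1 + (k : Int) := by
      push_cast; ring
    rw [h2]
  congr 1
  · apply List.map_congr_left
    intro k hk
    rw [List.mem_range] at hk
    simp only [Function.comp, pvCell, hh, hv]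
    rw [if_neg (by push_cast; omega), if_neg (by push_cast; omega), if_pos (by push_cast; omega)]
    have h3 : y2 - ((((y2 - y1).toNat + ((x2 - x1).toNat + k) : Nat) : Int)
        - ((y2 - y1).toNat : Int) - ((x2 - x1).toNat : Int)) = y2 - (k : Int) := by
      push_cast; ring
    rw [h3]
  · apply List.map_congr_left
    intro k hk
    rw [List.mem_range] at hk
    simp only [Function.comp, pvCell, hh, hv]
    rw [if_neg (by push_cast; omega), if_neg (by push_cast; omega), if_neg (by push_cast; omega)]
    have h4 : x2 - ((((y2 - y1).toNat + ((x2 - x1).toNat + ((y2 - y1).toNat + k)) : Nat) : Int)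
        - 2 * ((y2 - y1).toNat : Int) - ((x2 - x1).toNat : Int)) = x2 - (k : Int) := by
      push_cast; ring
    rw [h4]
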